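-- pv_equiv track=rewrite | github.com/jtimdwyer/project_euler | 31-40/p33.py | check_reduce
-- ===== SOURCE A (Python) =====
-- from itertools import product
--
-- def check_reduce(numer, denom):
--     """
--     numer and denom should be integers,
--     denom != 0, and this checks if there
--     is a misleading cancellation, i.e.
--     a digit in both numer and denom which
--     when deleted from both, is the same fraction
--     """
--
--     numer_str, denom_str = str(numer), str(denom)
--     numer_enumerate = enumerate(numer_str)
--     denom_enumerate = enumerate(denom_str)
--     char_iterator = product(numer_enumerate, denom_enumerate)
--
--     def int_try(number_string):
--         try:
--             return int(number_string)
--         except: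
--             return 0
--     for (n_index, n_char), (d_index, d_char) in char_iterator:
--         if n_char == d_char and n_char != '0':
--             tmp_numer = numer_str[:n_index] + numer_str[n_index+1:]
--             tmp_denom = denom_str[:d_index] + denom_str[d_index+1:]
--             if int_try(tmp_numer)*denom == numer*int_try(tmp_denom):
--                 return True
--     return False
-- ===== SOURCE B (Python) =====
-- def check_reduce(numer, denom):
--     """
--     Same task as A.  B removes the inner position scan entirely: it
--     precomputes, for each nonzero character of str(denom), the SET of values
--     obtainable by deleting one occurrence of that character, then for each
--     one-character deletion of str(numer) it solves the cross-multiplication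
--     a*denom == numer*b for b (exact division) and tests set membership.
--     Correct because for numer != 0 the equation determines b uniquely, and
--     when numer == 0 its string is '0', whose only character is excluded.
--     """
--     numer_str, denom_str = str(numer), str(denom)
--
--     def int_try(number_string):
--         try:
--             return int(number_string)
--         except:
--             return 0
--
--     denom_deletions = {}
--     for j, ch in enumerate(denom_str):
--         if ch != '0':
--             denom_deletions.setdefault(ch, set()).add(
--                 int_try(denom_str[:j] + denom_str[j + 1:]))
--
--     for i, ch in enumerate(numer_str):
--         if ch == '0' or ch not in denom_deletions:
--             continue
--         target = int_try(numer_str[:i] + numer_str[i + 1:]) * denom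
--         # numer != 0 here: str(0) == '0' has no admissible character
--         if target % numer == 0 and target // numer in denom_deletions[ch]:
--             return True
--     return False
-- ===== Notes on version B (the rewrite author's own statement) =====
-- stated objective: alternative
-- what changed: B removes A's inner scan over the Cartesian product of position pairs: it builds a dict from each nonzero character of str(denom) to the set of its one-deletion values, then for each one-character deletion a of str(numer) solves a*denom == numer*b exactly for b and tests set membership.
import Mathlib
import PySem

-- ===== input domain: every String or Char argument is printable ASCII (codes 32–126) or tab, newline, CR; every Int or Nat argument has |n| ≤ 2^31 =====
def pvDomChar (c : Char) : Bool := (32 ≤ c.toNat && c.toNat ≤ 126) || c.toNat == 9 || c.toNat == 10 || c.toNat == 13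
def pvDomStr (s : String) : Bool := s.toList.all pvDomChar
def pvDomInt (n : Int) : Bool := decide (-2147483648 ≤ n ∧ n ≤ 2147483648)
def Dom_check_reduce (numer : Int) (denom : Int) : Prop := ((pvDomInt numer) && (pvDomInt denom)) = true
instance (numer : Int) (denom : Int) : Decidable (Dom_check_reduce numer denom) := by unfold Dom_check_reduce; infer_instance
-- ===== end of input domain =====

-- B replaces A's scan over all position pairs by a precomputed index: a dict from each nonzero
-- character of str(denom) to the set of one-deletion values, queried by solving the
-- cross-multiplication for the unique candidate (alternative decomposition, same results).

-- shared helper: both Pythons define the identical int_try (int(s), empty/invalid -> 0)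
def intTry (cs : List Char) : Int := (PySem.Int.ofChars? cs).getD 0

-- shared helper: s[:i] + s[i+1:] (one-character deletion), written with PySem slices
def pvDel (cs : List Char) (i : Int) : List Char :=
  PySem.List.slice cs none (some i) ++ PySem.List.slice cs (some (i + 1)) none

-- ===== PORT A =====
-- product(enumerate(numer_str), enumerate(denom_str)) with early 'return True' ported as .any over the pair list
def check_reduce (numer : Int) (denom : Int) : Bool :=
  let ns := PySem.Int.toChars numer
  let ds := PySem.Int.toChars denom
  ((PySem.List.enumerate ns 0).flatMap
      (fun p => (PySem.List.enumerate ds 0).map (fun q => (p, q)))).any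
    (fun pq =>
      pq.1.2 == pq.2.2 && pq.1.2 != '0' &&
        (intTry (pvDel ns pq.1.1) * denom == numer * intTry (pvDel ds pq.2.1)))

-- ===== PORT B =====
-- first pass: dict mapping each nonzero char of str(denom) to the SET of one-deletion values;
-- second pass: for each deletion of str(numer) solve a*denom == numer*b exactly and look b up
def check_reduce_alt (numer : Int) (denom : Int) : Bool :=
  let ns := PySem.Int.toChars numer
  let ds := PySem.Int.toChars denom
  let dels : PySem.Dict Char (PySem.Set Int) :=
    (PySem.List.enumerate ds 0).foldl
      (fun d q =>
        if q.2 != '0' then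
          d.insert q.2 (PySem.Set.add (d.getD q.2 []) (intTry (pvDel ds q.1)))
        else d)
      ⟨[]⟩
  (PySem.List.enumerate ns 0).any (fun p =>
    if p.2 == '0' then false
    else
      match dels.get? p.2 with
      | none => false
      | some bucket =>
          let target := intTry (pvDel ns p.1) * denom
          PySem.Int.mod target numer == 0 && bucket.contains (PySem.Int.floordiv target numer))

-- ===== PRECONDITION & SPEC =====
def Spec_check_reduce (numer : Int) (denom : Int) (out : Bool) : Prop := out = check_reduce_alt numer denom
instance (numer : Int) (denom : Int) (out : Bool) : Decidable (Spec_check_reduce numer denom out) := by unfold Spec_check_reduce; infer_instance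

-- ===== CLAIM (what is proved, stated in full; the proofs are below) =====
def Claim_equal_check_reduce : Prop := ∀ (numer : Int) (denom : Int), Dom_check_reduce numer denom → Spec_check_reduce numer denom (check_reduce numer denom)

-- ===== LEMMAS AND PROOFS =====

-- B's dict-building step, named for the proofs
def pvStep (ds : List Char) (d : PySem.Dict Char (PySem.Set Int)) (q : Int × Char) :
    PySem.Dict Char (PySem.Set Int) :=
  if q.2 != '0' then
    d.insert q.2 (PySem.Set.add (d.getD q.2 []) (intTry (pvDel ds q.1)))
  else d

theorem check_reduce_eq_exists (numer denom : Int) :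
    check_reduce numer denom = true ↔
      ∃ p ∈ PySem.List.enumerate (PySem.Int.toChars numer) 0,
        ∃ q ∈ PySem.List.enumerate (PySem.Int.toChars denom) 0,
          p.2 = q.2 ∧ p.2 ≠ '0' ∧
            intTry (pvDel (PySem.Int.toChars numer) p.1) * denom
              = numer * intTry (pvDel (PySem.Int.toChars denom) q.1) := by
  simp [check_reduce, List.any_eq_true, Bool.and_eq_true, and_assoc]

-- invariant of B's first pass: one step's effect on a bucket
theorem mem_pvStep (ds : List Char) (d : PySem.Dict Char (PySem.Set Int))
    (q : Int × Char) (ch : Char) (b : Int) :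
    b ∈ (pvStep ds d q).getD ch [] ↔
      b ∈ d.getD ch [] ∨ (ch ≠ '0' ∧ q.2 = ch ∧ b = intTry (pvDel ds q.1)) := by
  unfold pvStep
  by_cases hq : q.2 = '0'
  · simp only [hq, bne_self_eq_false, Bool.false_eq_true, if_false]
    constructor
    · exact Or.inl
    · rintro (h | ⟨h0, he, _⟩)
      · exact h
      · exact absurd he.symm h0
  · rw [if_pos (by simp [hq])]
    by_cases hch : ch = q.2
    · subst hch
      rw [PySem.Dict.getD_insert, if_pos rfl]
      rw [PySem.Set.mem_add]
      constructor
      · rintro (h | h)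
        · exact Or.inl h
        · exact Or.inr ⟨hq, rfl, h⟩
      · rintro (h | ⟨_, _, h⟩)
        · exact Or.inl h
        · exact Or.inr h
    · rw [PySem.Dict.getD_insert, if_neg hch]
      constructor
      · exact Or.inl
      · rintro (h | ⟨_, he, _⟩)
        · exact h
        · exact absurd he.symm hch

-- invariant of B's first pass: what ends up in the bucket of a character
theorem mem_foldl_pvStep (ds : List Char) (l : List (Int × Char))
    (d : PySem.Dict Char (PySem.Set Int)) (ch : Char) (b : Int) :
    b ∈ (l.foldl (pvStep ds) d).getD ch [] ↔
      b ∈ d.getD ch [] ∨ (ch ≠ '0' ∧ ∃ q ∈ l, q.2 = ch ∧ b = intTry (pvDel ds q.1)) := by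
  induction l generalizing d with
  | nil => simp
  | cons q l ih =>
      rw [List.foldl_cons, ih, mem_pvStep]
      constructor
      · rintro ((h | ⟨h0, he, hb⟩) | ⟨h0, qq, hm, he, hb⟩)
        · exact Or.inl h
        · exact Or.inr ⟨h0, q, List.mem_cons_self, he, hb⟩
        · exact Or.inr ⟨h0, qq, List.mem_cons_of_mem _ hm, he, hb⟩
      · rintro (h | ⟨h0, qq, hm, he, hb⟩)
        · exact Or.inl (Or.inl h)
        · rcases List.mem_cons.mp hm with rfl | hm
          · exact Or.inl (Or.inr ⟨h0, he, hb⟩)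
          · exact Or.inr ⟨h0, qq, hm, he, hb⟩

-- exact division: the lookup test finds b iff numer*b equals the target (numer ≠ 0)
theorem div_lookup_iff (numer t : Int) (S : List Int) (h : numer ≠ 0) :
    (PySem.Int.mod t numer = 0 ∧ PySem.Int.floordiv t numer ∈ S) ↔
      ∃ b ∈ S, numer * b = t := by
  rw [PySem.Int.mod_eq_zero_iff_dvd]
  constructor
  · rintro ⟨⟨k, rfl⟩, hm⟩
    refine ⟨PySem.Int.floordiv (numer * k) numer, hm, ?_⟩
    simp [PySem.Int.floordiv, Int.mul_fdiv_cancel_left _ h]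
  · rintro ⟨b, hb, rfl⟩
    exact ⟨⟨b, rfl⟩, by simpa [PySem.Int.floordiv, Int.mul_fdiv_cancel_left _ h] using hb⟩

theorem check_reduce_alt_eq_exists (numer denom : Int) (h : numer ≠ 0) :
    check_reduce_alt numer denom = true ↔
      ∃ p ∈ PySem.List.enumerate (PySem.Int.toChars numer) 0,
        ∃ q ∈ PySem.List.enumerate (PySem.Int.toChars denom) 0,
          p.2 = q.2 ∧ p.2 ≠ '0' ∧
            intTry (pvDel (PySem.Int.toChars numer) p.1) * denom
              = numer * intTry (pvDel (PySem.Int.toChars denom) q.1) := by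
  unfold check_reduce_alt
  rw [List.any_eq_true]
  constructor
  · rintro ⟨p, hp, hpred⟩
    by_cases h0 : p.2 = '0'
    · simp [h0] at hpred
    · simp only [h0, beq_iff_eq, if_neg, not_false_eq_true] at hpred
      rw [show ((PySem.List.enumerate (PySem.Int.toChars denom) 0).foldl
            (fun d q => if q.2 != '0' then
              d.insert q.2 (PySem.Set.add (d.getD q.2 []) (intTry (pvDel (PySem.Int.toChars denom) q.1)))
              else d) ⟨[]⟩)
          = ((PySem.List.enumerate (PySem.Int.toChars denom) 0).foldl
            (pvStep (PySem.Int.toChars denom)) ⟨[]⟩) from rfl] at hpred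
      cases hget : ((PySem.List.enumerate (PySem.Int.toChars denom) 0).foldl
          (pvStep (PySem.Int.toChars denom)) ⟨[]⟩).get? p.2 with
      | none => rw [hget] at hpred; simp at hpred
      | some bucket =>
          rw [hget] at hpred
          simp only [Bool.and_eq_true, beq_iff_eq] at hpred
          obtain ⟨hmod, hmem⟩ := hpred
          rw [PySem.Set.contains_iff] at hmem
          have hmem' : PySem.Int.floordiv (intTry (pvDel (PySem.Int.toChars numer) p.1) * denom) numer
              ∈ ((PySem.List.enumerate (PySem.Int.toChars denom) 0).foldl
                  (pvStep (PySem.Int.toChars denom)) ⟨[]⟩).getD p.2 [] := by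
            simp [PySem.Dict.getD, hget]
            exact hmem
          rw [mem_foldl_pvStep] at hmem'
          rcases hmem' with hmem' | ⟨_, qq, hq, hqc, hqv⟩
          · simp [PySem.Dict.getD, PySem.Dict.get?] at hmem'
          · refine ⟨p, hp, qq, hq, hqc.symm, h0, ?_⟩
            have := (div_lookup_iff numer (intTry (pvDel (PySem.Int.toChars numer) p.1) * denom)
                [PySem.Int.floordiv (intTry (pvDel (PySem.Int.toChars numer) p.1) * denom) numer] h).mp
              ⟨hmod, by simp⟩
            rcases this with ⟨b, hbmem, hbe⟩
            simp at hbmem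
            rw [← hqv, ← hbmem]
            exact hbe.symm
  · rintro ⟨p, hp, qq, hq, hpq, h0, heq⟩
    refine ⟨p, hp, ?_⟩
    simp only [beq_iff_eq, h0, if_neg, not_false_eq_true]
    rw [show ((PySem.List.enumerate (PySem.Int.toChars denom) 0).foldl
          (fun d q => if q.2 != '0' then
            d.insert q.2 (PySem.Set.add (d.getD q.2 []) (intTry (pvDel (PySem.Int.toChars denom) q.1)))
            else d) ⟨[]⟩)
        = ((PySem.List.enumerate (PySem.Int.toChars denom) 0).foldl
          (pvStep (PySem.Int.toChars denom)) ⟨[]⟩) from rfl]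
    have hdl : (PySem.Int.mod (intTry (pvDel (PySem.Int.toChars numer) p.1) * denom) numer = 0 ∧
        PySem.Int.floordiv (intTry (pvDel (PySem.Int.toChars numer) p.1) * denom) numer
          ∈ ((PySem.List.enumerate (PySem.Int.toChars denom) 0).foldl
              (pvStep (PySem.Int.toChars denom)) ⟨[]⟩).getD p.2 []) := by
      rw [div_lookup_iff _ _ _ h]
      refine ⟨intTry (pvDel (PySem.Int.toChars denom) qq.1), ?_, heq.symm⟩
      rw [mem_foldl_pvStep]
      exact Or.inr ⟨hpq ▸ h0, qq, hq, hpq.symm, rfl⟩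
    obtain ⟨hmod, hmem⟩ := hdl
    cases hget : ((PySem.List.enumerate (PySem.Int.toChars denom) 0).foldl
        (pvStep (PySem.Int.toChars denom)) ⟨[]⟩).get? p.2 with
    | none => rw [PySem.Dict.getD, hget] at hmem; simp at hmem
    | some bucket =>
        rw [PySem.Dict.getD, hget] at hmem
        simp only [Option.getD_some] at hmem
        rw [Bool.and_eq_true, PySem.Set.contains_iff]
        exact ⟨by simp [hmod], hmem⟩

theorem check_reduce_zero (denom : Int) : check_reduce 0 denom = false := by
  simp [check_reduce, show PySem.Int.toChars 0 = ['0'] from rfl,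
    PySem.List.enumerate_cons, PySem.List.enumerate_nil]

theorem check_reduce_alt_zero (denom : Int) : check_reduce_alt 0 denom = false := by
  simp [check_reduce_alt, show PySem.Int.toChars 0 = ['0'] from rfl,
    PySem.List.enumerate_cons, PySem.List.enumerate_nil]

-- ===== VERDICT (by name: the statement is the Claim_ definition above) =====
theorem check_reduce_spec : Claim_equal_check_reduce := by
  intro numer denom _
  unfold Spec_check_reduce
  by_cases h : numer = 0
  · subst h; rw [check_reduce_zero, check_reduce_alt_zero]
  · rw [Bool.eq_iff_iff, check_reduce_eq_exists, check_reduce_alt_eq_exists numer denom h]
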